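-- pv_equiv track=rewrite | github.com/nimonian/aoc-23 | 07/b.py | get_signature
-- ===== SOURCE A (Python) =====
-- def get_signature(hand: str) -> dict:
--     count = {}
--     for card in hand:
--         if card in count:
--             count[card] += 1
--         else:
--             count[card] = 1
--
--     if len(count.values()) == 1:
--         return (5,)
--
--     signature = sorted(count[card] for card in count.keys() if card != "J")
--     signature[-1] += count["J"] if "J" in count else 0
--     return tuple(signature)
-- ===== SOURCE B (Python) =====
-- def get_signature(hand: str) -> dict:
--     # Count via sort + adjacent run-length scan instead of a hash dict.
--     cards = sorted(hand)
--     n = len(cards)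
--     runs = []
--     i = 0
--     while i < n:
--         j = i + 1
--         while j < n and cards[j] == cards[i]:
--             j += 1
--         runs.append((cards[i], j - i))
--         i = j
--     if len(runs) == 1:
--         return (5,)
--     jokers = 0
--     sig = []
--     for card, cnt in runs:
--         if card == 'J':
--             jokers = cnt
--         else:
--             sig.append(cnt)
--     sig.sort()
--     sig[-1] += jokers
--     return tuple(sig)
-- ===== Notes on version B (the rewrite author's own statement) =====
-- stated objective: alternative
-- what changed: Counting by a hash dict built in one pass is replaced by sorting the hand and deriving per-card run lengths from adjacent equal characters, with the joker count picked up in a single scan over the runs.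
import Mathlib
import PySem

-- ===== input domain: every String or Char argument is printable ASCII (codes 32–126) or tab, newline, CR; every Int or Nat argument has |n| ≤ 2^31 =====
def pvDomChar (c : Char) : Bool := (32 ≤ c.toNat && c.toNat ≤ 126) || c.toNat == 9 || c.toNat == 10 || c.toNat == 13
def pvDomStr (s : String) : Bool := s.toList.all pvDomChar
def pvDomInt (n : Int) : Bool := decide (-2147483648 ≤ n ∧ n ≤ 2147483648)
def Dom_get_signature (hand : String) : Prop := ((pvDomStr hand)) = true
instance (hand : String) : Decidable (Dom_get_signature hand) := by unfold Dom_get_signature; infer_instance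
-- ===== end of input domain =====

-- B replaces A's one-pass hash-dict counting by sorting the hand and scanning adjacent equal
-- characters for run lengths (an alternative decomposition; same outputs, no speed claim).


-- ===== PORT A =====
def get_signature (hand : String) : List Int :=
  let count : PySem.Dict Char Int := hand.toList.foldl
    (fun d card => if d.contains card then d.modify card 0 (· + 1) else d.insert card 1)
    PySem.Dict.empty
  if count.values.length == 1 then [5]
  else
    let signature := PySem.List.sorted
      ((count.keys.filter (fun card => card != 'J')).map (fun card => count.getD card 0))
      (fun x => x) false
    -- signature[-1] += …: on an empty signature Python raises IndexError (excluded by Pre_)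
    match signature.getLast? with
    | none => []
    | some v => signature.dropLast ++
        [v + (if count.contains 'J' then count.getD 'J' 0 else 0)]

-- ===== PORT B =====
-- Source B's nested while loops: run length of the leading card, then recurse past the run
def runLengths (l : List Char) : List (Char × Int) :=
  match l with
  | [] => []
  | c :: t =>
      (c, 1 + ((t.takeWhile (· == c)).length : Int)) :: runLengths (t.dropWhile (· == c))
termination_by l.length
decreasing_by simpa using Nat.lt_succ_of_le (List.length_dropWhile_le _ _)

def get_signature_alt (hand : String) : List Int :=
  let runs := runLengths (PySem.List.sorted hand.toList (fun c => c) false)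
  if runs.length == 1 then [5]
  else
    let p := runs.foldl
      (fun (p : Int × List Int) kv => if kv.1 == 'J' then (kv.2, p.2) else (p.1, p.2 ++ [kv.2]))
      (0, [])
    let sig := PySem.List.sorted p.2 (fun x => x) false
    -- sig[-1] += jokers: on an empty sig Python raises IndexError (excluded by Pre_)
    match sig.getLast? with
    | none => []
    | some v => sig.dropLast ++ [v + p.1]

-- ===== PRECONDITION & SPEC =====
-- Pre_ excludes only the empty hand, on which Python A (and Python B) raise IndexError at signature[-1].
def Pre_get_signature (hand : String) : Prop := hand.toList ≠ []
instance (hand : String) : Decidable (Pre_get_signature hand) := by unfold Pre_get_signature; infer_instance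
def pvWitness_get_signature : String := "A23JJ"

def Spec_get_signature (hand : String) (out : List Int) : Prop := out = get_signature_alt hand
instance (hand : String) (out : List Int) : Decidable (Spec_get_signature hand out) := by unfold Spec_get_signature; infer_instance

-- ===== CLAIM (what is proved, stated in full; the proofs are below) =====
def Claim_equal_get_signature : Prop := ∀ (hand : String), Dom_get_signature hand → Pre_get_signature hand → Spec_get_signature hand (get_signature hand)

-- ===== LEMMAS AND PROOFS =====

-- A's counting loop is collections.Counter
lemma countLoop_eq_counter (cs : List Char) :
    cs.foldl (fun d card => if d.contains card then d.modify card 0 (· + 1) else d.insert card 1)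
      (PySem.Dict.empty : PySem.Dict Char Int) = PySem.Dict.counter cs := by
  rw [PySem.Dict.counter_eq_foldl]
  refine PySem.List.foldl_congr_mem cs _ _ _ (fun d c _ => ?_)
  by_cases hcon : d.contains c = true
  · simp [hcon]
  · have hfalse : d.contains c = false := by simpa using hcon
    have h0 : d.getD c 0 = 0 := PySem.Dict.getD_of_not_contains d 0 hfalse
    show (if d.contains c = true then _ else d.insert c 1) = d.modify c 0 (· + 1)
    rw [if_neg (by simp [hfalse])]
    show d.insert c 1 = d.insert c (d.getD c 0 + 1)
    rw [h0]; norm_num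

-- the 'jokers = cnt on the J run' loop over a duplicate-free run list
lemma foldl_lastJ (l : List Char) (g : Char → Int) (a : Int) (h : l.Nodup) :
    l.foldl (fun acc k => if k == 'J' then g k else acc) a
      = if 'J' ∈ l then g 'J' else a := by
  induction l generalizing a with
  | nil => simp
  | cons k t ih =>
      rcases List.nodup_cons.mp h with ⟨hk, ht⟩
      by_cases hkJ : k = 'J'
      · subst hkJ
        have hrest : t.foldl (fun acc k => if k == 'J' then g k else acc) (g 'J') = g 'J' := by
          rw [PySem.List.foldl_congr_mem t _ (fun acc _ => acc) _
            (fun acc x hx => by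
              have hb : (x == 'J') = false := by
                simp only [beq_eq_false_iff_ne]; rintro rfl; exact hk hx
              simp [hb])]
          exact PySem.List.foldl_ignore _ _
        simp only [List.foldl_cons, beq_self_eq_true, if_true]
        rw [hrest]; simp
      · have hb : (k == 'J') = false := by simpa using hkJ
        simp only [List.foldl_cons, hb, Bool.false_eq_true, if_false]
        rw [ih a ht]
        have hnk : ¬('J' = k) := fun hh => hkJ hh.symm
        simp [List.mem_cons, hnk]

-- folding Set.add over elements already present is the identity
lemma foldl_add_of_subset (xs s : List Char) (h : ∀ x ∈ xs, x ∈ s) :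
    xs.foldl PySem.Set.add s = s := by
  induction xs generalizing s with
  | nil => rfl
  | cons x t ih =>
      have hmem : x ∈ s := h x (by simp)
      have hx : PySem.Set.add s x = s := by
        simp [PySem.Set.add, PySem.Set.contains, hmem]
      simp only [List.foldl_cons, hx]
      exact ih s (fun y hy => h y (by simp [hy]))

-- a head that never recurs commutes out of the Set.add fold
lemma foldl_add_cons_notmem (xs : List Char) (a : Char) (s : List Char) (ha : a ∉ xs) :
    xs.foldl PySem.Set.add (a :: s) = a :: xs.foldl PySem.Set.add s := by
  induction xs generalizing s with
  | nil => rfl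
  | cons x t ih =>
      have hxa : (x == a) = false := by
        simp only [beq_eq_false_iff_ne]; rintro rfl; exact ha (by simp)
      have hstep : PySem.Set.add (a :: s) x = a :: PySem.Set.add s x := by
        simp only [PySem.Set.add, PySem.Set.contains, List.contains_cons, hxa, Bool.false_or]
        by_cases hc : x ∈ s <;> simp [hc]
      simp only [List.foldl_cons, hstep]
      exact ih (PySem.Set.add s x) (fun h => ha (by simp [h]))

-- run lengths of a weakly sorted list: one entry per distinct element, carrying its count
lemma runLengths_sorted (l : List Char) (h : l.Pairwise (· ≤ ·)) :
    runLengths l = (PySem.Set.ofList l).map (fun k => (k, (l.count k : Int))) := by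
  induction l using runLengths.induct with
  | case1 => simp [runLengths, PySem.Set.ofList_eq_foldl]
  | case2 c t ih =>
      have htsplit : t.takeWhile (· == c) ++ t.dropWhile (· == c) = t :=
        List.takeWhile_append_dropWhile
      have hpt : t.Pairwise (· ≤ ·) := (List.pairwise_cons.mp h).2
      have hle : ∀ x ∈ t, c ≤ x := (List.pairwise_cons.mp h).1
      have ht1c : ∀ x ∈ t.takeWhile (· == c), x = c := fun x hx => by
        simpa using List.mem_takeWhile_imp hx
      have ht2p : (t.dropWhile (· == c)).Pairwise (· ≤ ·) :=
        hpt.sublist (List.dropWhile_sublist _)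
      have hct2 : c ∉ t.dropWhile (· == c) := by
        intro hc
        obtain ⟨h2, t2', ht2⟩ : ∃ h2 t2', t.dropWhile (· == c) = h2 :: t2' := by
          cases hd : t.dropWhile (· == c) with
          | nil => rw [hd] at hc; simp at hc
          | cons a b => exact ⟨a, b, rfl⟩
        rw [ht2] at hc ht2p
        have hh2 : (h2 == c) = false := by
          have h0 : (t.dropWhile (· == c)).head? = some h2 := by rw [ht2]; rfl
          have := List.head?_dropWhile_not (· == c) t
          rw [h0] at this; simpa using this
        have hne : h2 ≠ c := by simpa using hh2
        have hmem : h2 ∈ t := (List.dropWhile_sublist _).mem (by rw [ht2]; simp)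
        have hch2 : c ≤ h2 := hle h2 hmem
        rcases List.mem_cons.mp hc with rfl | hc'
        · exact hne rfl
        · exact hne (le_antisymm ((List.pairwise_cons.mp ht2p).1 c hc') hch2)
      have hset : PySem.Set.ofList (c :: t) =
          c :: PySem.Set.ofList (t.dropWhile (· == c)) := by
        rw [PySem.Set.ofList_eq_foldl, PySem.Set.ofList_eq_foldl]
        conv_lhs => rw [← htsplit]
        show List.foldl PySem.Set.add (PySem.Set.add [] c) (_ ++ _) = _
        have he : PySem.Set.add ([] : List Char) c = [c] := rfl
        rw [he, List.foldl_append,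
          foldl_add_of_subset _ [c] (fun x hx => by simp [ht1c x hx])]
        exact foldl_add_cons_notmem _ c [] hct2
      have hcount_c : (((c :: t).count c : Nat) : Int) =
          1 + ((t.takeWhile (· == c)).length : Int) := by
        have h1 : (t.takeWhile (· == c)).count c = (t.takeWhile (· == c)).length := by
          rw [List.count_eq_length]; intro b hb; exact (ht1c b hb).symm
        have h2 : (t.dropWhile (· == c)).count c = 0 := List.count_eq_zero.mpr hct2
        rw [List.count_cons_self]
        conv_lhs => rw [← htsplit]
        rw [List.count_append, h1, h2]
        push_cast; ring
      have hcount_k : ∀ k ∈ PySem.Set.ofList (t.dropWhile (· == c)),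
          (((c :: t).count k : Nat) : Int) = (((t.dropWhile (· == c)).count k : Nat) : Int) := by
        intro k hk
        have hkt2 : k ∈ t.dropWhile (· == c) := (PySem.Set.mem_ofList _ _).mp hk
        have hkc : k ≠ c := fun hkc => hct2 (hkc ▸ hkt2)
        have hk1 : (t.takeWhile (· == c)).count k = 0 :=
          List.count_eq_zero.mpr (fun hkt1 => hkc (ht1c k hkt1))
        rw [List.count_cons_of_ne (Ne.symm hkc)]
        conv_lhs => rw [← htsplit]
        rw [List.count_append, hk1]
        simp
      rw [runLengths, hset, List.map_cons, ih ht2p, hcount_c]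
      congr 1
      exact (List.map_congr_left (fun k hk => by rw [← hcount_k k hk])).symm

-- the two programs agree (on every hand; Python raises only on the empty hand, excluded by Pre_)
lemma get_signature_eq_alt (hand : String) : get_signature hand = get_signature_alt hand := by
  simp only [get_signature, get_signature_alt]
  rw [countLoop_eq_counter]
  have hsp : (PySem.List.sorted hand.toList (fun c => c) false).Pairwise (· ≤ ·) :=
    PySem.List.sorted_pairwise hand.toList (fun c => c)
  have hperm : (PySem.List.sorted hand.toList (fun c => c) false).Perm hand.toList :=
    PySem.List.sorted_perm hand.toList (fun c => c) false
  rw [runLengths_sorted _ hsp]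
  set cs := hand.toList with hcs
  set s := PySem.List.sorted cs (fun c => c) false with hsd
  have hnodup' : (PySem.Set.ofList s).Nodup := PySem.Set.nodup_ofList _
  have hnodup : (PySem.Set.ofList cs).Nodup := PySem.Set.nodup_ofList _
  have hSS : (PySem.Set.ofList s).Perm (PySem.Set.ofList cs) :=
    (List.perm_ext_iff_of_nodup hnodup' hnodup).mpr
      (fun a => by
        rw [PySem.Set.mem_ofList, PySem.Set.mem_ofList]
        exact hperm.mem_iff)
  have hvlen : (PySem.Dict.counter cs).values.length = (PySem.Set.ofList cs).length := by
    show ((PySem.Dict.counter cs).items.map _).length = _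
    rw [PySem.Dict.items_counter]; simp
  have hrlen : ((PySem.Set.ofList s).map (fun k => (k, (s.count k : Int)))).length
      = (PySem.Set.ofList cs).length := by
    rw [List.length_map]; exact hSS.length_eq
  rw [hvlen, hrlen]
  by_cases hone : ((PySem.Set.ofList cs).length == 1) = true
  · simp [hone]
  · simp only [hone, Bool.false_eq_true, if_false]
    have hjoker :
        (if (PySem.Dict.counter cs).contains 'J' then (PySem.Dict.counter cs).getD 'J' 0 else 0)
          = (if 'J' ∈ PySem.Set.ofList s then (s.count 'J' : Int) else 0) := by
      rw [PySem.Dict.contains_counter, PySem.Dict.getD_counter]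
      by_cases hJ : 'J' ∈ cs
      · rw [if_pos (by simpa using hJ), if_pos (by
          rw [PySem.Set.mem_ofList]; exact hperm.mem_iff.mpr hJ), hperm.count_eq]
      · rw [if_neg (by simpa using hJ), if_neg (by
          rw [PySem.Set.mem_ofList]; exact fun h => hJ (hperm.mem_iff.mp h))]
    have hsplit : ((PySem.Set.ofList s).map (fun k => (k, (s.count k : Int)))).foldl
        (fun (p : Int × List Int) kv => if kv.1 == 'J' then (kv.2, p.2) else (p.1, p.2 ++ [kv.2]))
        (0, [])
        = (((PySem.Set.ofList s).map (fun k => (k, (s.count k : Int)))).foldl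
            (fun a kv => if kv.1 == 'J' then kv.2 else a) 0,
           ((PySem.Set.ofList s).map (fun k => (k, (s.count k : Int)))).foldl
            (fun acc kv => if kv.1 == 'J' then acc else acc ++ [kv.2]) []) := by
      rw [show (fun (p : Int × List Int) (kv : Char × Int) =>
            if kv.1 == 'J' then (kv.2, p.2) else (p.1, p.2 ++ [kv.2]))
          = (fun p kv => ((fun a kv => if kv.1 == 'J' then kv.2 else a) p.1 kv,
              (fun acc kv => if kv.1 == 'J' then acc else acc ++ [kv.2]) p.2 kv)) from
        funext fun p => funext fun kv => by by_cases hb : (kv.1 == 'J') = true <;> simp [hb]]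
      exact PySem.List.foldl_prod_mk (fun (a : Int) (kv : Char × Int) => if kv.1 == 'J' then kv.2 else a)
        (fun (acc : List Int) (kv : Char × Int) => if kv.1 == 'J' then acc else acc ++ [kv.2]) _ 0 []
    rw [hsplit]
    have hjB : (((PySem.Set.ofList s).map (fun k => (k, (s.count k : Int)))).foldl
        (fun a kv => if kv.1 == 'J' then kv.2 else a) 0)
        = (if 'J' ∈ PySem.Set.ofList s then (s.count 'J' : Int) else 0) := by
      rw [List.foldl_map]
      exact foldl_lastJ _ _ 0 hnodup'
    have hsB : (((PySem.Set.ofList s).map (fun k => (k, (s.count k : Int)))).foldl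
        (fun acc kv => if kv.1 == 'J' then acc else acc ++ [kv.2]) [])
        = ((PySem.Set.ofList s).filter (fun k => k != 'J')).map (fun k => (s.count k : Int)) := by
      rw [PySem.List.foldl_congr_mem _ _
        (fun acc kv => if (kv.1 != 'J') then acc ++ [kv.2] else acc) _
        (fun acc kv _ => by by_cases hb : (kv.1 == 'J') = true <;> simp [bne, hb])]
      rw [PySem.List.foldl_append_if]
      rw [List.filter_map, List.map_map]
      rfl
    rw [hjB, hsB]
    have hsig : PySem.List.sorted
        (((PySem.Dict.counter cs).keys.filter (fun card => card != 'J')).map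
          (fun card => (PySem.Dict.counter cs).getD card 0)) (fun x => x) false
        = PySem.List.sorted
          (((PySem.Set.ofList s).filter (fun k => k != 'J')).map (fun k => (s.count k : Int)))
          (fun x => x) false := by
      rw [PySem.Dict.keys_counter]
      simp only [PySem.Dict.getD_counter]
      refine (PySem.List.sorted_eq_sorted_of_perm _ _ (fun x => x) (fun a b h => h) ?_).symm
      have : ((PySem.Set.ofList s).filter (fun k => k != 'J')).map (fun k => (s.count k : Int))
          = ((PySem.Set.ofList s).filter (fun k => k != 'J')).map (fun k => (cs.count k : Int)) :=
        List.map_congr_left (fun k _ => by rw [hperm.count_eq])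
      rw [this]
      exact (hSS.filter _).map _
    rw [hsig, hjoker]

-- ===== VERDICT (by name: the statement is the Claim_ definition above) =====
theorem get_signature_spec : Claim_equal_get_signature := by
  intro hand _hd _hp
  exact get_signature_eq_alt hand
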